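-- pv_equiv track=rewrite | github.com/VladislavMil/vestacka_inteligencija | lab1/source.py | kreiraj
-- ===== SOURCE A (Python) =====
-- def kreiraj(n):
--     prazna = []
--     brojac = 0
--     for i in range(0, n + 1):
--         brojac += i
--         tuple = (i, brojac**2)
--         prazna.append(tuple)
--     return prazna
-- ===== SOURCE B (Python) =====
-- def kreiraj(n):
--     return [(i, (i * (i + 1) // 2) ** 2) for i in range(0, n + 1)]
-- ===== Notes on version B (the rewrite author's own statement) =====
-- stated objective: simpler
-- what changed: Replaces the running accumulator (brojac += i) with the closed-form triangular number of i computed from i alone, returned as a single comprehension with no carried state.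
import Mathlib
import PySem

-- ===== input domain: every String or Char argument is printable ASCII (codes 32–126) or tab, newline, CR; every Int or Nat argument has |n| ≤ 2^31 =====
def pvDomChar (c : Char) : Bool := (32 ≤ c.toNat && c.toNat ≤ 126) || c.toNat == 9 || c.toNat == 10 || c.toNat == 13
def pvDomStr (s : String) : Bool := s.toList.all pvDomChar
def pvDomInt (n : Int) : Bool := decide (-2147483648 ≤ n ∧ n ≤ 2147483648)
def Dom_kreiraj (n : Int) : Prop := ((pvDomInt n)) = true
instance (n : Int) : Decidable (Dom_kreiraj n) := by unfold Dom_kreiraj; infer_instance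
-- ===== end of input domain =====

-- B drops A's running accumulator and computes each triangular number in closed form from i alone (objective: simpler).


-- ===== PORT A =====
-- Literal port of A: fold over range(0, n+1) carrying (prazna, brojac); each step
-- does brojac += i then appends (i, brojac**2).
def kreiraj (n : Int) : List (Int × Int) :=
  ((PySem.List.pyRange 0 (n + 1) 1).foldl
    (fun st i => (st.1 ++ [(i, (st.2 + i) ^ 2)], st.2 + i))
    (([] : List (Int × Int)), (0 : Int))).1

-- ===== PORT B =====
-- Port of B: comprehension, each element computed from i alone via the closed form.
def kreiraj_alt (n : Int) : List (Int × Int) :=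
  (PySem.List.pyRange 0 (n + 1) 1).map
    (fun i => (i, (PySem.Int.floordiv (i * (i + 1)) 2) ^ 2))

-- ===== PRECONDITION & SPEC =====
def Spec_kreiraj (n : Int) (out : List (Int × Int)) : Prop := out = kreiraj_alt n
instance (n : Int) (out : List (Int × Int)) : Decidable (Spec_kreiraj n out) := by unfold Spec_kreiraj; infer_instance

-- ===== CLAIM (what is proved, stated in full; the proofs are below) =====
def Claim_equal_kreiraj : Prop := ∀ (n : Int), Dom_kreiraj n → Spec_kreiraj n (kreiraj n)

-- ===== LEMMAS AND PROOFS =====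

-- ===== VERDICT (by name: the statement is the Claim_ definition above) =====
-- brojac after processing i-1 equals (i-1)*i // 2; one step keeps the invariant
theorem kreiraj_tri_step (a : Int) :
    PySem.Int.floordiv ((a - 1) * a) 2 + a = PySem.Int.floordiv (a * (a + 1)) 2 := by
  have h : a * (a + 1) = (a - 1) * a + a * 2 := by ring
  unfold PySem.Int.floordiv
  rw [h, Int.add_mul_fdiv_right _ _ (by norm_num)]

theorem kreiraj_key (m : Nat) : ∀ (a : Int) (acc : List (Int × Int)) (c : Int),
    c = PySem.Int.floordiv ((a - 1) * a) 2 →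
    ((PySem.List.pyRange a (a + m) 1).foldl
        (fun st i => (st.1 ++ [(i, (st.2 + i) ^ 2)], st.2 + i)) (acc, c)).1
      = acc ++ (PySem.List.pyRange a (a + m) 1).map
          (fun i => (i, (PySem.Int.floordiv (i * (i + 1)) 2) ^ 2)) := by
  induction m with
  | zero =>
    intro a acc c hc
    simp [PySem.List.pyRange_one_eq_nil]
  | succ k ih =>
    intro a acc c hc
    rw [PySem.List.pyRange_one_cons (by push_cast; omega : a < a + ((k + 1 : Nat) : Int))]
    simp only [List.foldl_cons, List.map_cons]
    have ha : a + ((k + 1 : Nat) : Int) = (a + 1) + (k : Nat) := by push_cast; ring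
    rw [ha]
    have hc' : c + a = PySem.Int.floordiv ((a + 1 - 1) * (a + 1)) 2 := by
      rw [hc, show (a + 1 - 1) * (a + 1) = a * (a + 1) by ring]
      exact kreiraj_tri_step a
    rw [ih (a + 1) (acc ++ [(a, (c + a) ^ 2)]) (c + a) hc']
    rw [hc', show (a + 1 - 1) * (a + 1) = a * (a + 1) by ring]
    simp

theorem kreiraj_spec : Claim_equal_kreiraj := by
  intro n _
  unfold Spec_kreiraj kreiraj kreiraj_alt
  by_cases h : n + 1 ≤ 0
  · simp [PySem.List.pyRange_one_eq_nil (by omega : n + 1 ≤ 0)]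
  · have hm : n + 1 = (0 : Int) + ((n + 1).toNat : Nat) := by omega
    rw [hm, kreiraj_key ((n + 1).toNat) 0 [] 0 (by decide)]
    simp
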